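-- pv_equiv track=rewrite | github.com/m0r13/pyvisual | pyvisual/editor/main.py | match_substring_partly
-- ===== SOURCE A (Python) =====
-- def match_substring_partly(substring, string):
--     # returns (True, n) if substring is a substring of string,
--     # n determines how many characters are skipped in total
--     # where characters in string can be skipped
--     # otherwise it returns (False, _)
--     # example: "infloat" is in "inputfloat"
--
--     # empty substring always contained
--     if not substring:
--         return True, 0
--     # index in substring
--     j = 0
--     # number of skipped characters
--     n = 0
--     # last index in string where we found the same character
--     last_match = None
--     for i, c in enumerate(string):
--         if c == substring[j]:
--             # advance one character in substring
--             j += 1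
--             if last_match is not None:
--                 n += i - last_match - 1
--             last_match = i
--             if j == len(substring):
--                 return True, n
--     return j == len(substring), n
-- ===== SOURCE B (Python) =====
-- def match_substring_partly(substring, string):
--     # Different decomposition: iterate over the SUBSTRING, jumping through
--     # string with str.find; skip total recovered by the closed form
--     # last - first - (count - 1).
--     pos = 0
--     first = -1
--     last = -1
--     count = 0
--     for ch in substring:
--         idx = string.find(ch, pos)
--         if idx == -1:
--             break
--         if count == 0:
--             first = idx
--         last = idx
--         count += 1
--         pos = idx + 1
--     n = last - first - (count - 1) if count > 0 else 0
--     return count == len(substring), n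
-- ===== Notes on version B (the rewrite author's own statement) =====
-- stated objective: alternative
-- what changed: B iterates over the substring and jumps through the string with str.find(ch, pos) instead of scanning the string character by character, and recovers the skip total from the closed form last - first - (count - 1) instead of an incremental running sum.
import Mathlib
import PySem

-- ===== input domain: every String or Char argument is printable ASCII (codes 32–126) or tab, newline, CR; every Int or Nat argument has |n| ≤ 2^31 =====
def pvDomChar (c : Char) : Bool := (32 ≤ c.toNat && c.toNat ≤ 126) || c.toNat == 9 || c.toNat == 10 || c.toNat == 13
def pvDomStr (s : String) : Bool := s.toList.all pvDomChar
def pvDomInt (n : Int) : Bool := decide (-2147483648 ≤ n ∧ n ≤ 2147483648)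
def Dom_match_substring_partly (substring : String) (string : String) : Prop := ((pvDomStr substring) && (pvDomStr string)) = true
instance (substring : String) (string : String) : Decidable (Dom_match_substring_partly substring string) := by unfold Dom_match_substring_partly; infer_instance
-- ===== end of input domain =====

-- B re-decomposes A's character-by-character scan of `string` into a loop over
-- `substring` that jumps through `string` with str.find and recovers the skip
-- total by the closed form last - first - (count - 1) (objective: alternative).

-- ===== PORT A =====
-- A's for-loop over enumerate(string) with state (j, n, last_match)
def aLoop (sub : List Char) : List Char → Int → Nat → Int → Option Int → Bool × Int
  | [], _, j, n, _ => (decide (j = sub.length), n)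
  | c :: cs, i, j, n, lm =>
    if sub[j]? = some c then
      let n' := match lm with
        | some l => n + (i - l - 1)
        | none => n
      if j + 1 = sub.length then (true, n')
      else aLoop sub cs (i + 1) (j + 1) n' (some i)
    else aLoop sub cs (i + 1) j n lm

def match_substring_partly (substring : String) (string : String) : Bool × Int :=
  if substring.toList.isEmpty then (true, 0)
  else aLoop substring.toList string.toList 0 0 0 none

-- ===== PORT B =====
-- B's for-loop over substring with state (pos, first, last, count); break = return state
def bLoop (string : String) : List Char → Int → Int → Int → Nat → Int × Int × Nat
  | [], _, first, last, count => (first, last, count)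
  | c :: cs, pos, first, last, count =>
    let idx := PySem.Str.findFrom string (String.ofList [c]) pos none
    if idx = -1 then (first, last, count)
    else bLoop string cs (idx + 1) (if count = 0 then idx else first) idx (count + 1)

def match_substring_partly_alt (substring : String) (string : String) : Bool × Int :=
  let r := bLoop string substring.toList 0 (-1) (-1) 0
  (decide (r.2.2 = substring.toList.length),
   if 0 < r.2.2 then r.2.1 - r.1 - ((r.2.2 : Int) - 1) else 0)

-- ===== PRECONDITION & SPEC =====
def Spec_match_substring_partly (substring : String) (string : String) (out : Bool × Int) : Prop := out = match_substring_partly_alt substring string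
instance (substring : String) (string : String) (out : Bool × Int) : Decidable (Spec_match_substring_partly substring string out) := by unfold Spec_match_substring_partly; infer_instance

-- ===== CLAIM (what is proved, stated in full; the proofs are below) =====
def Claim_equal_match_substring_partly : Prop := ∀ (substring : String) (string : String), Dom_match_substring_partly substring string → Spec_match_substring_partly substring string (match_substring_partly substring string)

-- ===== LEMMAS AND PROOFS =====

theorem pv_prefix_singleton (c : Char) (l : List Char) : [c] <+: l ↔ l.head? = some c := by
  cases l with
  | nil => simp
  | cons x xs => simp [List.cons_prefix_cons, eq_comm]

theorem pv_infix_singleton (c : Char) (l : List Char) : [c] <:+: l ↔ c ∈ l := by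
  constructor
  · intro h; exact h.mem (List.mem_singleton_self c)
  · intro h
    obtain ⟨s, t, rfl⟩ := List.append_of_mem h
    exact ⟨s, t, by simp⟩

-- find on a single-character needle is the first index of that character
theorem pv_find_singleton (l : List Char) (c : Char) :
    PySem.Chars.find l [c] = match PySem.List.index? l c with
      | none => -1
      | some k => (k : Int) := by
  cases h : PySem.List.index? l c with
  | none =>
    have hnm : c ∉ l := (PySem.List.index?_eq_none_iff l c).mp h
    simpa using (PySem.Chars.find_eq_neg_one_iff l [c]).mpr (fun hin => hnm ((pv_infix_singleton c l).mp hin))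
  | some k =>
    obtain ⟨hk, hval, hfirst⟩ := PySem.List.getElem_of_index?_eq_some h
    have hin : [c] <:+: l := (pv_infix_singleton c l).mpr (hval ▸ l.getElem_mem hk)
    have h0 : 0 ≤ PySem.Chars.find l [c] := (PySem.Chars.find_nonneg_iff l [c]).mpr hin
    obtain ⟨hpre, hmin⟩ := PySem.Chars.find_spec (s := l) (sub := [c]) h0
    set f := (PySem.Chars.find l [c]).toNat with hf
    have hfd : l[f]? = some c := by
      have := (pv_prefix_singleton c (l.drop f)).mp hpre
      simpa [List.head?_drop] using this
    have hne : ¬ f < k := by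
      intro hlt
      have hfl : f < l.length := (List.getElem?_eq_some_iff.mp hfd).1
      exact hfirst f hlt (by simpa [List.getElem?_eq_getElem hfl] using hfd)
    have hne' : ¬ k < f := by
      intro hlt
      exact hmin k hlt ((pv_prefix_singleton c (l.drop k)).mpr (by simp [List.head?_drop, List.getElem?_eq_getElem hk, hval]))
    have hfk : f = k := by omega
    show PySem.Chars.find l [c] = (k : Int)
    calc PySem.Chars.find l [c] = (f : Int) := by rw [hf, Int.toNat_of_nonneg h0]
      _ = (k : Int) := by rw [hfk]

-- Unrolling A's loop to its next match: scanning cs at offset i0 with j < |sub|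
-- either never matches again, or jumps straight to the first occurrence of sub[j].
theorem aLoop_step (sub : List Char) (j : Nat) (c : Char) (hc : sub[j]? = some c)
    (hj : j < sub.length) :
    ∀ (cs : List Char) (i0 : Int) (n : Int) (lm : Option Int),
    aLoop sub cs i0 j n lm =
      match PySem.List.index? cs c with
      | none => (false, n)
      | some k =>
        let i := i0 + (k : Int)
        let n' := match lm with
          | some l => n + (i - l - 1)
          | none => n
        if j + 1 = sub.length then (true, n')
        else aLoop sub (cs.drop (k + 1)) (i + 1) (j + 1) n' (some i) := by
  intro cs
  induction cs with
  | nil =>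
    intro i0 n lm
    simp [aLoop, PySem.List.index?, Nat.ne_of_lt hj]
  | cons x xs ih =>
    intro i0 n lm
    by_cases hx : x = c
    · subst hx
      rw [PySem.List.index?_cons_self]
      simp [aLoop, hc]
    · have hx' : sub[j]? ≠ some x := by simp [hc]; exact fun h => hx h.symm
      rw [PySem.List.index?_cons_of_ne xs hx]
      have hstep : aLoop sub (x :: xs) i0 j n lm = aLoop sub xs (i0 + 1) j n lm := by
        simp [aLoop, hx']
      rw [hstep, ih (i0 + 1) n lm]
      cases hidx : PySem.List.index? xs c with
      | none => rfl
      | some k =>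
        simp only [Option.map_some, List.drop_succ_cons]
        have hcast : i0 + 1 + (k : Int) = i0 + ((k + 1 : Nat) : Int) := by push_cast; ring
        rw [hcast]

-- Per-case corollaries of aLoop_step (match-free, convenient for rewriting)
theorem aLoop_none (sub : List Char) (j : Nat) (c : Char) (hc : sub[j]? = some c)
    (hj : j < sub.length) (cs : List Char) (i0 n : Int) (lm : Option Int)
    (h : PySem.List.index? cs c = none) :
    aLoop sub cs i0 j n lm = (false, n) := by
  rw [aLoop_step sub j c hc hj cs i0 n lm, h]

theorem aLoop_some_some (sub : List Char) (j : Nat) (c : Char) (hc : sub[j]? = some c)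
    (hj : j < sub.length) (cs : List Char) (i0 n : Int) (k : Nat) (l : Int)
    (h : PySem.List.index? cs c = some k) :
    aLoop sub cs i0 j n (some l) =
      if j + 1 = sub.length then (true, n + (i0 + (k : Int) - l - 1))
      else aLoop sub (cs.drop (k + 1)) (i0 + (k : Int) + 1) (j + 1)
        (n + (i0 + (k : Int) - l - 1)) (some (i0 + (k : Int))) := by
  rw [aLoop_step sub j c hc hj cs i0 n (some l), h]

theorem aLoop_some_none (sub : List Char) (j : Nat) (c : Char) (hc : sub[j]? = some c)
    (hj : j < sub.length) (cs : List Char) (i0 n : Int) (k : Nat)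
    (h : PySem.List.index? cs c = some k) :
    aLoop sub cs i0 j n none =
      if j + 1 = sub.length then (true, n)
      else aLoop sub (cs.drop (k + 1)) (i0 + (k : Int) + 1) (j + 1) n (some (i0 + (k : Int))) := by
  rw [aLoop_step sub j c hc hj cs i0 n none, h]

-- bLoop's find step, rewritten through index? on the dropped suffix
theorem pv_findFrom_singleton (t : String) (c : Char) (pos : Nat) (hpos : pos ≤ t.toList.length) :
    PySem.Str.findFrom t (String.ofList [c]) (pos : Int) none =
      match PySem.List.index? (t.toList.drop pos) c with
      | none => -1
      | some k => ((pos + k : Nat) : Int) := by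
  have h := PySem.Chars.findFrom_natCast t.toList [c] pos hpos
  rw [PySem.Str.findFrom_eq]
  simp only [String.toList_ofList] at *
  rw [h, pv_find_singleton]
  cases hidx : PySem.List.index? (t.toList.drop pos) c with
  | none => simp
  | some k => simp

theorem pv_findFrom_none (t : String) (c : Char) (pos : Nat) (hpos : pos ≤ t.toList.length)
    (h : PySem.List.index? (t.toList.drop pos) c = none) :
    PySem.Str.findFrom t (String.ofList [c]) (pos : Int) none = -1 := by
  rw [pv_findFrom_singleton t c pos hpos, h]

theorem pv_findFrom_some (t : String) (c : Char) (pos : Nat) (hpos : pos ≤ t.toList.length)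
    (k : Nat) (h : PySem.List.index? (t.toList.drop pos) c = some k) :
    PySem.Str.findFrom t (String.ofList [c]) (pos : Int) none = ((pos + k : Nat) : Int) := by
  rw [pv_findFrom_singleton t c pos hpos, h]

-- Main invariant: after j ≥ 1 matches with first/last match indices first/last,
-- A's remaining scan equals B's remaining find-loop plus the closed form.
theorem pv_main (t : String) (sub : List Char) :
    ∀ (fuel j pos : Nat) (first last : Int),
    sub.length - j = fuel → 1 ≤ j → j < sub.length → pos ≤ t.toList.length →
    aLoop sub (t.toList.drop pos) (pos : Int) j (last - first - ((j : Int) - 1)) (some last) =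
      (let r := bLoop t (sub.drop j) (pos : Int) first last j
       (decide (r.2.2 = sub.length), if 0 < r.2.2 then r.2.1 - r.1 - ((r.2.2 : Int) - 1) else 0)) := by
  intro fuel
  induction fuel with
  | zero => intro j pos first last hfuel h1 hj hpos; omega
  | succ m ih =>
    intro j pos first last hfuel h1 hj hpos
    have hc : sub[j]? = some sub[j] := List.getElem?_eq_getElem hj
    have hdropj : sub.drop j = sub[j] :: sub.drop (j + 1) := List.drop_eq_getElem_cons hj
    rw [hdropj]
    simp only [bLoop]
    cases hidx : PySem.List.index? (t.toList.drop pos) sub[j] with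
    | none =>
      rw [aLoop_none sub j sub[j] hc hj _ _ _ _ hidx]
      simp only [pv_findFrom_none t sub[j] pos hpos hidx]
      simp only [reduceIte]
      simp [Nat.ne_of_lt hj, Nat.lt_of_lt_of_le Nat.zero_lt_one h1]
    | some k =>
      have hk : k < (t.toList.drop pos).length := (PySem.List.getElem_of_index?_eq_some hidx).1
      have hklen : pos + k < t.toList.length := by rw [List.length_drop] at hk; omega
      have hne : ¬ ((pos + k : Nat) : Int) = -1 := by omega
      rw [aLoop_some_some sub j sub[j] hc hj _ _ _ k last hidx]
      simp only [pv_findFrom_some t sub[j] pos hpos k hidx]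
      rw [if_neg hne, if_neg (by omega : ¬ j = 0)]
      rw [show (pos : Int) + (k : Int) = ((pos + k : Nat) : Int) from by push_cast; ring]
      by_cases hend : j + 1 = sub.length
      · have hdrop : sub.drop (j + 1) = [] := by rw [hend]; simp
        simp only [if_pos hend, hdrop, bLoop, Prod.mk.injEq]
        constructor
        · simp [hend]
        · rw [if_pos (by omega : 0 < j + 1)]
          push_cast; ring
      · rw [if_neg hend]
        have hrw : (t.toList.drop pos).drop (k + 1) = t.toList.drop (pos + k + 1) := by
          rw [List.drop_drop]; ring_nf
        have hn' : last - first - ((j : Int) - 1) + (((pos + k : Nat) : Int) - last - 1)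
            = ((pos + k : Nat) : Int) - first - (((j + 1 : Nat) : Int) - 1) := by push_cast; ring
        have hi1 : ((pos + k : Nat) : Int) + 1 = ((pos + k + 1 : Nat) : Int) := by push_cast; ring
        rw [hrw, hn', hi1]
        rw [ih (j + 1) (pos + k + 1) first ((pos + k : Nat) : Int)
          (by omega) (by omega) (by omega) (by omega)]

-- ===== VERDICT (by name: the statement is the Claim_ definition above) =====
theorem match_substring_partly_spec : Claim_equal_match_substring_partly := by
  intro substring string _
  unfold Spec_match_substring_partly match_substring_partly match_substring_partly_alt
  cases hsub : substring.toList with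
  | nil => simp [bLoop]
  | cons c rest =>
    simp only [List.isEmpty_cons]
    rw [if_neg (by simp : ¬ false = true)]
    have hj0 : (0 : Nat) < (c :: rest).length := by simp
    have hc : (c :: rest)[0]? = some c := rfl
    simp only [bLoop]
    rw [show (0 : Int) = ((0 : Nat) : Int) from rfl]
    cases hidx : PySem.List.index? (string.toList.drop 0) c with
    | none =>
      rw [aLoop_none (c :: rest) 0 c hc hj0 _ _ _ _ (by simpa using hidx)]
      simp only [pv_findFrom_none string c 0 (by simp) hidx]
      simp only [reduceIte]
      simp
    | some k =>
      have hk : k < (string.toList.drop 0).length := (PySem.List.getElem_of_index?_eq_some hidx).1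
      have hklen : k < string.toList.length := by simpa using hk
      have hne : ¬ ((0 + k : Nat) : Int) = -1 := by omega
      rw [aLoop_some_none (c :: rest) 0 c hc hj0 _ _ _ k (by simpa using hidx)]
      simp only [pv_findFrom_some string c 0 (by simp) k hidx]
      rw [if_neg hne]
      simp only [reduceIte]
      rw [show ((0 : Nat) : Int) + (k : Int) = ((0 + k : Nat) : Int) from by push_cast; ring]
      by_cases hend : 0 + 1 = (c :: rest).length
      · have hrest : rest = [] := by
          simp only [List.length_cons] at hend
          exact List.eq_nil_of_length_eq_zero (by omega)
        subst hrest
        rw [if_pos hend]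
        simp only [bLoop]
        simp
      · rw [if_neg hend]
        have hrest1 : (1 : Nat) < (c :: rest).length := by
          simp only [List.length_cons] at hend ⊢; omega
        have hmain := pv_main string (c :: rest) ((c :: rest).length - 1) 1 (0 + k + 1)
          ((0 + k : Nat) : Int) ((0 + k : Nat) : Int) rfl (le_refl 1) hrest1 (by omega)
        simp only [List.drop_one, List.tail_cons] at hmain
        convert hmain using 2 <;> simp
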